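-- pv_equiv track=rewrite | github.com/skyrim4ev3r/leetcode_solutions | algorithms/1_easy/S/03687_smallest_absent_positive_greater_than_average/solution.py | smallestAbsent
-- ===== SOURCE A (Python) =====
-- from typing import List
--
-- def smallestAbsent(nums: List[int]) -> int:
--     sum_nums = sum(nums)
--     avg = sum_nums // len(nums)
--
--     num_set = set()
--     for  num in nums:
--         if num > avg and num > 0:
--             num_set.add(num)
--     res = max(1, avg + 1)
--     while res in num_set:
--         res += 1
--
--     return res
-- ===== SOURCE B (Python) =====
-- def smallestAbsent(nums):
--     avg = sum(nums) // len(nums)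
--     res = max(1, avg + 1)
--     for x in sorted(set(nums)):
--         if x < res:
--             continue
--         if x == res:
--             res += 1
--         else:
--             break
--     return res
-- ===== Notes on version B (the rewrite author's own statement) =====
-- stated objective: alternative
-- what changed: Replaces A's filtered-set build plus repeated 'while res in set' membership probing with a single monotone pass over sorted(set(nums)) that advances res on equality and breaks at the first larger value.
import Mathlib
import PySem

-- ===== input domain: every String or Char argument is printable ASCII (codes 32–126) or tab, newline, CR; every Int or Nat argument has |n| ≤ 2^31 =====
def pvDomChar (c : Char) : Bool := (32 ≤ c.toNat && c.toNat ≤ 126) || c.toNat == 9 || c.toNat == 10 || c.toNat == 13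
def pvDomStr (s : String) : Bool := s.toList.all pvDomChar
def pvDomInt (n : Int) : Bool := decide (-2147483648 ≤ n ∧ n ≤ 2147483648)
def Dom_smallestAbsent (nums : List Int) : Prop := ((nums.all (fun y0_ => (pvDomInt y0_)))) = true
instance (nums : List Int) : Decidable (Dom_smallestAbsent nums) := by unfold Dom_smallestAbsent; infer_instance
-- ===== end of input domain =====

-- B replaces A's repeated set-membership probing by one monotone pass over sorted(set(nums)); return values proved equal on nonempty lists.

-- ===== PORT A =====
-- termination helper lemmas for A's while-loop (cited by probeA's decreasing_by)
theorem pvFilter_mono (t : List Int) (res : Int) :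
    (t.filter (fun x => decide (res + 1 ≤ x))).length ≤ (t.filter (fun x => decide (res ≤ x))).length := by
  induction t with
  | nil => simp
  | cons a t ih =>
    simp only [List.filter_cons]
    by_cases h1 : res + 1 ≤ a
    · rw [if_pos (decide_eq_true h1), if_pos (decide_eq_true (show res ≤ a by omega))]
      simpa using ih
    · rw [if_neg (by simpa using h1)]
      by_cases h2 : res ≤ a
      · rw [if_pos (decide_eq_true h2)]
        simp only [List.length_cons]; omega
      · rw [if_neg (by simpa using h2)]
        exact ih

theorem pvProbe_measure (s : List Int) (res : Int) (h : res ∈ s) :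
    (s.filter (fun x => decide (res + 1 ≤ x))).length < (s.filter (fun x => decide (res ≤ x))).length := by
  induction s with
  | nil => cases h
  | cons a t ih =>
    simp only [List.filter_cons]
    rcases List.mem_cons.mp h with rfl | ht
    · have := pvFilter_mono t res
      rw [if_neg (by simp), if_pos (decide_eq_true (le_refl res))]
      simp only [List.length_cons]; omega
    · have := ih ht
      by_cases h1 : res + 1 ≤ a
      · rw [if_pos (decide_eq_true h1), if_pos (decide_eq_true (show res ≤ a by omega))]
        simp only [List.length_cons]; omega
      · rw [if_neg (by simpa using h1)]
        by_cases h2 : res ≤ a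
        · rw [if_pos (decide_eq_true h2)]
          simp only [List.length_cons]; omega
        · rw [if_neg (by simpa using h2)]
          exact this

-- 'while res in num_set: res += 1'
def probeA (s : List Int) (res : Int) : Int :=
  if h : res ∈ s then probeA s (res + 1) else res
termination_by (s.filter (fun x => decide (res ≤ x))).length
decreasing_by exact pvProbe_measure s res h

def smallestAbsent (nums : List Int) : Int :=
  let sum_nums := nums.sum
  let avg := PySem.Int.floordiv sum_nums nums.length
  let num_set := nums.foldl (fun s num => if avg < num ∧ 0 < num then PySem.Set.add s num else s) PySem.Set.empty
  probeA num_set (max 1 (avg + 1))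

-- ===== PORT B =====
-- 'for x in sorted(set(nums)): skip / bump / break'
def scanB : List Int → Int → Int
  | [], res => res
  | x :: xs, res =>
    if x < res then scanB xs res
    else if x = res then scanB xs (res + 1)
    else res

def smallestAbsent_alt (nums : List Int) : Int :=
  let avg := PySem.Int.floordiv nums.sum nums.length
  scanB (PySem.List.sorted (PySem.Set.ofList nums) (fun x => x) false) (max 1 (avg + 1))

-- ===== PRECONDITION & SPEC =====
-- Pre_ excludes only the empty list, on which Python A raises ZeroDivisionError
def Pre_smallestAbsent (nums : List Int) : Prop := nums ≠ []
instance (nums : List Int) : Decidable (Pre_smallestAbsent nums) := by unfold Pre_smallestAbsent; infer_instance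
def pvWitness_smallestAbsent : List Int := [3]

def Spec_smallestAbsent (nums : List Int) (out : Int) : Prop := out = smallestAbsent_alt nums
instance (nums : List Int) (out : Int) : Decidable (Spec_smallestAbsent nums out) := by unfold Spec_smallestAbsent; infer_instance

-- ===== CLAIM (what is proved, stated in full; the proofs are below) =====
def Claim_equal_smallestAbsent : Prop := ∀ (nums : List Int), Dom_smallestAbsent nums → Pre_smallestAbsent nums → Spec_smallestAbsent nums (smallestAbsent nums)

-- ===== LEMMAS AND PROOFS =====

-- characterization of A's probe loop
theorem probeA_char (s : List Int) (res : Int) :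
    probeA s res ∉ s ∧ res ≤ probeA s res ∧ ∀ k, res ≤ k → k < probeA s res → k ∈ s := by
  generalize hn : (s.filter (fun x => decide (res ≤ x))).length = n
  induction n using Nat.strong_induction_on generalizing res with
  | _ n ih =>
    rw [probeA]
    by_cases h : res ∈ s
    · rw [dif_pos h]
      have hlt := pvProbe_measure s res h
      obtain ⟨h1, h2, h3⟩ := ih _ (by omega) (res + 1) rfl
      refine ⟨h1, by omega, fun k hk1 hk2 => ?_⟩
      by_cases hk : k = res
      · exact hk ▸ h
      · exact h3 k (by omega) hk2
    · rw [dif_neg h]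
      exact ⟨h, le_refl _, fun k hk1 hk2 => absurd hk1 (by omega)⟩

-- characterization of B's scan over a strictly increasing list
theorem scanB_char (l : List Int) (hl : l.Pairwise (· < ·)) (res : Int) :
    scanB l res ∉ l ∧ res ≤ scanB l res ∧ ∀ k, res ≤ k → k < scanB l res → k ∈ l := by
  induction l generalizing res with
  | nil =>
    refine ⟨by simp [scanB], by simp [scanB], fun k h1 h2 => ?_⟩
    simp only [scanB] at h2
    exact absurd h1 (by omega)
  | cons x xs ih =>
    have hx : ∀ y ∈ xs, x < y := (List.pairwise_cons.mp hl).1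
    have hxs := ih (List.pairwise_cons.mp hl).2
    simp only [scanB]
    by_cases h1 : x < res
    · simp only [if_pos h1]
      obtain ⟨a1, a2, a3⟩ := hxs res
      refine ⟨?_, a2, fun k hk1 hk2 => List.mem_cons.mpr (Or.inr (a3 k hk1 hk2))⟩
      simp only [List.mem_cons, not_or]
      exact ⟨by omega, a1⟩
    · simp only [if_neg h1]
      by_cases h2 : x = res
      · simp only [if_pos h2]
        obtain ⟨a1, a2, a3⟩ := hxs (res + 1)
        refine ⟨?_, by omega, fun k hk1 hk2 => ?_⟩
        · simp only [List.mem_cons, not_or]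
          exact ⟨by omega, a1⟩
        · by_cases hk : k = res
          · exact List.mem_cons.mpr (Or.inl (by omega))
          · exact List.mem_cons.mpr (Or.inr (a3 k (by omega) hk2))
      · simp only [if_neg h2]
        refine ⟨?_, le_refl _, fun k hk1 hk2 => absurd hk1 (by omega)⟩
        simp only [List.mem_cons, not_or]
        exact ⟨by omega, fun hm => by have := hx _ hm; omega⟩

-- membership in A's filtered set
theorem memS (nums : List Int) (avg : Int) (acc : List Int) (x : Int) :
    x ∈ nums.foldl (fun s num => if avg < num ∧ 0 < num then PySem.Set.add s num else s) acc ↔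
      x ∈ acc ∨ (x ∈ nums ∧ avg < x ∧ 0 < x) := by
  induction nums generalizing acc with
  | nil => simp
  | cons a t ih =>
    simp only [List.foldl_cons, ih]
    by_cases h : avg < a ∧ 0 < a
    · simp [h, PySem.Set.mem_add, List.mem_cons]
      constructor
      · rintro (⟨h1 | rfl⟩ | h2)
        · exact Or.inl h1
        · exact Or.inr ⟨Or.inl rfl, h⟩
        · exact Or.inr ⟨Or.inr h2.1, h2.2⟩
      · rintro (h1 | ⟨rfl | h2, h3⟩)
        · exact Or.inl (Or.inl h1)
        · exact Or.inl (Or.inr rfl)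
        · exact Or.inr ⟨h2, h3⟩
    · simp only [if_neg h, List.mem_cons]
      constructor
      · rintro (h1 | h2)
        · exact Or.inl h1
        · exact Or.inr ⟨Or.inr h2.1, h2.2⟩
      · rintro (h1 | ⟨rfl | h2, h3⟩)
        · exact Or.inl h1
        · exact absurd h3 h
        · exact Or.inr ⟨h2, h3⟩

-- ===== VERDICT (by name: the statement is the Claim_ definition above) =====
theorem smallestAbsent_spec : Claim_equal_smallestAbsent := by
  intro nums _ _
  unfold Spec_smallestAbsent smallestAbsent smallestAbsent_alt
  simp only []
  set avg := PySem.Int.floordiv nums.sum nums.length with havg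
  set r0 := max 1 (avg + 1) with hr0
  set S := nums.foldl (fun s num => if avg < num ∧ 0 < num then PySem.Set.add s num else s) PySem.Set.empty with hS
  set L := PySem.List.sorted (PySem.Set.ofList nums) (fun x => x) false with hL
  have hmemS : ∀ x, x ∈ S ↔ x ∈ nums ∧ avg < x ∧ 0 < x := by
    intro x; rw [hS, memS]; simp [PySem.Set.empty]
  have hmemL : ∀ x, x ∈ L ↔ x ∈ nums := by
    intro x; rw [hL, PySem.List.mem_sorted, PySem.Set.mem_ofList]
  obtain ⟨a1, a2, a3⟩ := probeA_char S r0
  obtain ⟨b1, b2, b3⟩ := scanB_char L (PySem.List.sorted_ofList_pairwise_lt nums) r0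
  set oA := probeA S r0
  set oB := scanB L r0
  -- both are the least k ≥ r0 with k ∉ nums
  have hAnot : oA ∉ nums := fun hm => a1 ((hmemS oA).mpr ⟨hm, by omega, by omega⟩)
  have hBnot : oB ∉ nums := fun hm => b1 ((hmemL oB).mpr hm)
  rcases lt_trichotomy oA oB with h | h | h
  · exact absurd ((hmemL oA).mp (b3 oA a2 h)) hAnot
  · exact h
  · exact absurd ((hmemS oB).mp (a3 oB b2 h)).1 hBnot
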